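-- pv_equiv track=rewrite | github.com/akaDestrocore/STM32F407_XMODEM_Bootloader | scripts/memap.py | columnate
-- ===== SOURCE A (Python) =====
-- import math
--
-- def columnate(strings, separator=", ", chars=80):
--     """ render a list of strings as a in a bunch of columns
--
--     Positional arguments:
--     strings - the strings to columnate
--
--     Keyword arguments;
--     separator - the separation between the columns
--     chars - the maximum with of a row
--     """
--     col_width = max(len(s) for s in strings)
--     total_width = col_width + len(separator)
--     columns = math.floor(chars / total_width)
--     output = ""
--     for i, string in zip(range(len(strings)), strings):
--         append = string
--         if i != len(strings) - 1:
--             append += separator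
--         if i % columns == columns - 1:
--             append += "\n"
--         else:
--             append = append.ljust(total_width)
--         output += append
--     return output
-- ===== SOURCE B (Python) =====
-- import math
--
-- def columnate(strings, separator=", ", chars=80):
--     """Row-chunking re-implementation: group the strings into rows of
--     `columns` cells and render each cell, instead of one indexed pass."""
--     col_width = max(len(s) for s in strings)
--     total_width = col_width + len(separator)
--     columns = math.floor(chars / total_width)
--     rows = [strings[r:r + columns] for r in range(0, len(strings), columns)]
--     parts = []
--     for r, row in enumerate(rows):
--         last_row = (r == len(rows) - 1)
--         for c, s in enumerate(row):
--             cell = s if (last_row and c == len(row) - 1) else s + separator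
--             if c == columns - 1:
--                 cell += "\n"
--             else:
--                 cell = cell.ljust(total_width)
--             parts.append(cell)
--     return "".join(parts)
-- ===== Notes on version B (the rewrite author's own statement) =====
-- stated objective: alternative
-- what changed: B slices the input into rows of `columns` strings and renders each row's cells (last-cell-of-row / last-row tests), instead of A's single indexed pass that decides line breaks with i % columns.
-- outside the precondition, e.g. on columnate(['a'], ', ', -5): A returns 'a  ', B returns ''
import Mathlib
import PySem

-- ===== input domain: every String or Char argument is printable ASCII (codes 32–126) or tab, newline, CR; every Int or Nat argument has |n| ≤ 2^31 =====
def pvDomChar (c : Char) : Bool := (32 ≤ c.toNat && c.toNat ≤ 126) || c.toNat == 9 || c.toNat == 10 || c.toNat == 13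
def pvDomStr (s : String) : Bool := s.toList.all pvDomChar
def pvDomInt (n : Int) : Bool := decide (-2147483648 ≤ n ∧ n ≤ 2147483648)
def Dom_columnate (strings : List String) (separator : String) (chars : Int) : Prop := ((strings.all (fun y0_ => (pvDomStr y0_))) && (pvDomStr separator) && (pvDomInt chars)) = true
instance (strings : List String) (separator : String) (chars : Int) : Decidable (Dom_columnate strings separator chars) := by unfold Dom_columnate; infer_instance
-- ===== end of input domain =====

-- B renders the same columns by slicing the input into rows of `columns` cells and emitting
-- them row by row, instead of A's single indexed pass deciding line breaks with i % columns
-- (objective: alternative decomposition, same cost).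

-- ===== PORT A =====
-- str.ljust(w): right-pad with spaces up to width w (no-op if already ≥ w); used by both Pythons
def pvLjust (cs : List Char) (w : Int) : List Char :=
  cs ++ List.replicate (w - (cs.length : Int)).toNat ' '

def columnate (strings : List String) (separator : String) (chars : Int) : String :=
  let colWidth : Int :=
    match strings.map (fun s => (s.toList.length : Int)) with
    | [] => 0
    | x :: xs => xs.foldl max x
  let totalWidth : Int := colWidth + (separator.toList.length : Int)
  let columns : Int := PySem.Int.floordiv chars totalWidth
  let n : Int := (strings.length : Int)
  let out : List Char := (PySem.List.enumerate strings).foldl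
    (fun (output : List Char) (p : Int × String) =>
      let app0 := p.2.toList
      let app1 := if p.1 ≠ n - 1 then app0 ++ separator.toList else app0
      let app2 := if PySem.Int.mod p.1 columns = columns - 1 then app1 ++ ['\n']
                  else pvLjust app1 totalWidth
      output ++ app2)
    []
  String.ofList out

def columnate_alt (strings : List String) (separator : String) (chars : Int) : String :=
  let colWidth : Int :=
    match strings.map (fun s => (s.toList.length : Int)) with
    | [] => 0
    | x :: xs => xs.foldl max x
  let totalWidth : Int := colWidth + (separator.toList.length : Int)
  let columns : Int := PySem.Int.floordiv chars totalWidth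
  let rows : List (List String) :=
    (PySem.List.pyRange 0 (strings.length : Int) columns).map
      (fun r => PySem.List.slice strings (some r) (some (r + columns)))
  let parts : List (List Char) := (PySem.List.enumerate rows).foldl
    (fun (acc : List (List Char)) (rp : Int × List String) =>
      let lastRow : Prop := rp.1 = (rows.length : Int) - 1
      (PySem.List.enumerate rp.2).foldl
        (fun (acc2 : List (List Char)) (cp : Int × String) =>
          let cell0 := if lastRow ∧ cp.1 = (rp.2.length : Int) - 1 then cp.2.toList
                       else cp.2.toList ++ separator.toList
          let cell1 := if cp.1 = columns - 1 then cell0 ++ ['\n'] else pvLjust cell0 totalWidth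
          acc2 ++ [cell1])
        acc)
    []
  String.ofList (PySem.Chars.join [] parts)

-- ===== PRECONDITION & SPEC =====
-- Pre_ excludes the inputs where A raises (empty list: ValueError from max; total width 0, or
-- 0 ≤ chars < total width making columns == 0: ZeroDivisionError) and the unspecified corner of a
-- negative chars budget, where columns is negative and A happens to pad every cell with no newline
-- while B's row slicing yields no rows — both values are defensible for a nonsensical maximum width.
def Pre_columnate (strings : List String) (separator : String) (chars : Int) : Prop :=
  strings ≠ [] ∧
  0 < (strings.map (fun s => (s.toList.length : Int))).foldl max 0 + (separator.toList.length : Int) ∧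
  (strings.map (fun s => (s.toList.length : Int))).foldl max 0 + (separator.toList.length : Int) ≤ chars
instance (strings : List String) (separator : String) (chars : Int) : Decidable (Pre_columnate strings separator chars) := by unfold Pre_columnate; infer_instance

def pvWitness_columnate : List String × String × Int := (["ab", "c"], ", ", 80)

def Spec_columnate (strings : List String) (separator : String) (chars : Int) (out : String) : Prop := out = columnate_alt strings separator chars
instance (strings : List String) (separator : String) (chars : Int) (out : String) : Decidable (Spec_columnate strings separator chars out) := by unfold Spec_columnate; infer_instance

-- ===== CLAIM (what is proved, stated in full; the proofs are below) =====
def Claim_equal_columnate : Prop := ∀ (strings : List String) (separator : String) (chars : Int), Dom_columnate strings separator chars → Pre_columnate strings separator chars → Spec_columnate strings separator chars (columnate strings separator chars)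

-- ===== LEMMAS AND PROOFS =====

lemma pv_count_arith (a b k : Int) (hk : 0 < k) (hab : a < b) :
    ((b - a + k - 1) / k).toNat = (if a + k < b then ((b - (a+k) + k - 1) / k).toNat else 0) + 1 := by
  have h2 : (b - a + k - 1) / k = (b - a - 1) / k + 1 := by
    rw [show b - a + k - 1 = (b - a - 1) + 1 * k by ring,
        Int.add_mul_ediv_right _ _ (by omega : k ≠ 0)]
  have hq : 0 ≤ (b - a - 1) / k := Int.ediv_nonneg (by omega) (by omega)
  by_cases h : a + k < b
  · rw [if_pos h, show b - (a + k) + k - 1 = b - a - 1 by ring, h2]; omega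
  · rw [if_neg h, h2, Int.ediv_eq_zero_of_lt (by omega) (by omega)]; rfl

lemma pv_pyRange_cons (a b k : Int) (hk : 0 < k) (hab : a < b) :
    PySem.List.pyRange a b k = a :: PySem.List.pyRange (a + k) b k := by
  rw [PySem.List.pyRange_of_pos _ _ hk, PySem.List.pyRange_of_pos _ _ hk, if_pos hab,
      pv_count_arith a b k hk hab, List.range_succ_eq_map]
  simp only [List.map_cons, List.map_map, Nat.cast_zero, mul_zero, add_zero]
  congr 1
  apply List.map_congr_left
  intro x _
  simp [Function.comp]
  ring

lemma pv_pyRange_shift (a b k : Int) (hk : 0 < k) :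
    PySem.List.pyRange (a + k) b k = (PySem.List.pyRange a (b - k) k).map (fun r => r + k) := by
  rw [PySem.List.pyRange_of_pos _ _ hk, PySem.List.pyRange_of_pos _ _ hk]
  rw [show b - (a + k) + k - 1 = b - k - a + k - 1 by ring]
  rw [if_congr (by omega : a + k < b ↔ a < b - k) rfl rfl]
  rw [List.map_map]
  apply List.map_congr_left
  intro x _
  simp [Function.comp]; ring

def pvChunks {α : Type} : List α → Nat → List (List α)
  | [], _ => []
  | x :: xs, k => (x :: xs).take (k + 1) :: pvChunks (xs.drop k) k
termination_by l _ => l.length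
decreasing_by simp

lemma pvChunks_nil {α : Type} (k : Nat) : pvChunks ([] : List α) k = [] := by
  rw [pvChunks.eq_def]
lemma pvChunks_cons {α : Type} (x : α) (xs : List α) (k : Nat) :
    pvChunks (x :: xs) k = (x :: xs).take (k + 1) :: pvChunks (xs.drop k) k := by
  rw [pvChunks.eq_def]

lemma pv_rows_eq (k : Int) (hk : 0 < k) :
    ∀ (fuel : Nat) (l : List String), l.length ≤ fuel →
      (PySem.List.pyRange 0 (l.length : Int) k).map
        (fun r => PySem.List.slice l (some r) (some (r + k))) = pvChunks l (k.toNat - 1) := by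
  intro fuel
  induction fuel with
  | zero =>
    intro l hl
    have h0 : l = [] := List.length_eq_zero_iff.mp (by omega)
    subst h0
    rw [pvChunks_nil, PySem.List.pyRange_of_pos _ _ hk]
    simp
  | succ f ih =>
    intro l hl
    match l with
    | [] =>
      rw [pvChunks_nil, PySem.List.pyRange_of_pos _ _ hk]; simp
    | x :: xs =>
      rw [pvChunks_cons]
      have hlen : (0:Int) < ((x :: xs).length : Int) := by simp
      rw [pv_pyRange_cons 0 _ k hk hlen, List.map_cons]
      have htake : PySem.List.slice (x :: xs) (some 0) (some (0 + k)) = (x :: xs).take (k.toNat - 1 + 1) := by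
        rw [zero_add, PySem.List.slice_zero_start, PySem.List.slice_to _ (le_of_lt hk)]
        congr 1; omega
      rw [htake]
      congr 1
      have hdrop : xs.drop (k.toNat - 1) = (x :: xs).drop k.toNat := by
        cases hknt : k.toNat with
        | zero => omega
        | succ m => simp
      rw [hdrop, zero_add]
      have hshift := pv_pyRange_shift 0 ((x :: xs).length : Int) k hk
      rw [zero_add] at hshift
      rw [hshift, List.map_map]
      by_cases hle : k ≤ ((x :: xs).length : Int)
      · rw [← ih ((x :: xs).drop k.toNat) (by rw [List.length_drop]; simp only [List.length_cons] at hl ⊢; omega)]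
        have hlen2 : (((x :: xs).drop k.toNat).length : Int) = ((x :: xs).length : Int) - k := by
          rw [List.length_drop]; omega
        rw [hlen2]
        apply List.map_congr_left
        intro r hr
        have hr0 : 0 ≤ r ∧ r < ((x :: xs).length : Int) - k := by
          have := (PySem.List.mem_pyRange_iff_of_pos hk r).mp hr
          omega
        simp only [Function.comp]
        have h1 : (r + k).toNat = r.toNat + k.toNat := by omega
        have h2 : (r + k + k).toNat = r.toNat + k.toNat + k.toNat := by omega
        rw [PySem.List.slice_toNat _ (by omega) (by omega),
            PySem.List.slice_toNat _ (by omega) (by omega), List.drop_drop, h1, h2, Nat.add_comm r.toNat k.toNat]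
        congr 1
        omega
      · have hnil : (x :: xs).drop k.toNat = [] := by rw [List.drop_eq_nil_iff]; omega
        rw [hnil, pvChunks_nil]
        rw [PySem.List.pyRange_of_pos _ _ hk, if_neg (by omega)]
        simp

def pvCellA (sepL : List Char) (tw k n : Int) (p : Int × String) : List Char :=
  let app1 := if p.1 ≠ n - 1 then p.2.toList ++ sepL else p.2.toList
  if PySem.Int.mod p.1 k = k - 1 then app1 ++ ['\n'] else pvLjust app1 tw

def pvCellB (sepL : List Char) (tw k : Int) (last : Bool) (len : Int) (cp : Int × String) : List Char :=
  let cell0 := if last ∧ cp.1 = len - 1 then cp.2.toList else cp.2.toList ++ sepL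
  if cp.1 = k - 1 then cell0 ++ ['\n'] else pvLjust cell0 tw

def pvRowCells (sepL : List Char) (tw k : Int) (last : Bool) (row : List String) : List (List Char) :=
  (PySem.List.enumerate row).map (pvCellB sepL tw k last (row.length : Int))

def pvBcells (sepL : List Char) (tw k : Int) : List (List String) → List (List Char)
  | [] => []
  | row :: rest => pvRowCells sepL tw k rest.isEmpty row ++ pvBcells sepL tw k rest

lemma pv_enumerate_shift {α : Type} (xs : List α) (a b : Int) :
    PySem.List.enumerate xs (a + b) = (PySem.List.enumerate xs b).map (fun p => (a + p.1, p.2)) := by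
  induction xs generalizing b with
  | nil => simp [PySem.List.enumerate_nil]
  | cons x t ih =>
    rw [PySem.List.enumerate_cons, PySem.List.enumerate_cons]
    simp only [List.map_cons]
    rw [show a + b + 1 = a + (b + 1) by ring, ih]

lemma pv_mod_block (q c k : Int) (hk : 0 < k) (h0 : 0 ≤ c) (hck : c < k) :
    PySem.Int.mod (q * k + c) k = c := by
  rw [PySem.Int.mod_eq_emod_of_pos hk, show q * k + c = c + q * k by ring,
      Int.add_mul_emod_self_right, Int.emod_eq_of_lt h0 hck]

lemma pv_row_last (sepL : List Char) (tw k : Int) (hk : 0 < k)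
    (t : List String) (q : Nat) (htl : (t.length : Int) ≤ k) :
    (PySem.List.enumerate t ((q : Int) * k)).map
      (pvCellA sepL tw k ((q : Int) * k + (t.length : Int))) =
    pvRowCells sepL tw k true t := by
  have hsh := pv_enumerate_shift t ((q : Int) * k) 0
  rw [add_zero] at hsh
  rw [hsh, List.map_map, pvRowCells]
  apply List.map_congr_left
  intro p hp
  obtain ⟨c, hcl, rfl⟩ := (PySem.List.mem_enumerate_iff t 0 p).mp hp
  have hm : PySem.Int.mod ((q : Int) * k + (0 + (c : Int))) k = (c : Int) := by
    rw [show (q : Int) * k + (0 + (c : Int)) = (q : Int) * k + (c : Int) by ring]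
    exact pv_mod_block _ _ _ hk (by omega) (by omega)
  simp only [Function.comp, pvCellA, pvCellB, hm]
  have e1 : ((q : Int) * k + (0 + (c : Int)) ≠ (q : Int) * k + (t.length : Int) - 1) =
      ¬((c : Int) = (t.length : Int) - 1) := by
    apply propext; constructor <;> intro h1 h2 <;> omega
  have e2 : ((0 : Int) + (c : Int) = (t.length : Int) - 1) = ((c : Int) = (t.length : Int) - 1) := by
    apply propext; constructor <;> intro <;> omega
  have e3 : ((0 : Int) + (c : Int) = k - 1) = ((c : Int) = k - 1) := by
    apply propext; constructor <;> intro <;> omega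
  simp only [e1, e2, e3, true_and, ite_not]

lemma pv_row_notlast (sepL : List Char) (tw k n : Int) (hk : 0 < k)
    (t : List String) (q : Nat) (htl : (t.length : Int) = k)
    (hn : (q : Int) * k + k < n) :
    (PySem.List.enumerate t ((q : Int) * k)).map (pvCellA sepL tw k n) =
    pvRowCells sepL tw k false t := by
  have hsh := pv_enumerate_shift t ((q : Int) * k) 0
  rw [add_zero] at hsh
  rw [hsh, List.map_map, pvRowCells]
  apply List.map_congr_left
  intro p hp
  obtain ⟨c, hcl, rfl⟩ := (PySem.List.mem_enumerate_iff t 0 p).mp hp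
  have hck : (c : Int) < k := by omega
  have hm : PySem.Int.mod ((q : Int) * k + (0 + (c : Int))) k = (c : Int) := by
    rw [show (q : Int) * k + (0 + (c : Int)) = (q : Int) * k + (c : Int) by ring]
    exact pv_mod_block _ _ _ hk (by omega) hck
  simp only [Function.comp, pvCellA, pvCellB, hm]
  have e1 := eq_true (show (q : Int) * k + (0 + (c : Int)) ≠ n - 1 by omega)
  have e3 : ((0 : Int) + (c : Int) = k - 1) = ((c : Int) = k - 1) := by
    apply propext; constructor <;> intro <;> omega
  simp only [e1, e3, if_true, Bool.false_eq_true, false_and, if_false]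

lemma pv_chunks_nil_iff {α : Type} (l : List α) (k : Nat) : pvChunks l k = [] ↔ l = [] := by
  cases l with
  | nil => simp [pvChunks_nil]
  | cons x xs => rw [pvChunks_cons]; simp

lemma pv_cells_eq (sepL : List Char) (tw k : Int) (hk : 0 < k) :
    ∀ (fuel : Nat) (l : List String), l.length ≤ fuel → l ≠ [] → ∀ (q : Nat),
      (PySem.List.enumerate l ((q : Int) * k)).map
        (pvCellA sepL tw k ((q : Int) * k + (l.length : Int))) =
      pvBcells sepL tw k (pvChunks l (k.toNat - 1)) := by
  intro fuel
  induction fuel with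
  | zero =>
    intro l hl hne q
    exact absurd (List.length_eq_zero_iff.mp (by omega)) hne
  | succ f ih =>
    intro l hl hne q
    match l with
    | [] => exact absurd rfl hne
    | x :: xs =>
      rw [pvChunks_cons]
      have hdrop : xs.drop (k.toNat - 1) = (x :: xs).drop k.toNat := by
        cases hknt : k.toNat with
        | zero => omega
        | succ m => simp
      have htake1 : (k.toNat - 1) + 1 = k.toNat := by omega
      rw [hdrop, htake1, pvBcells]
      have hsplit : (x :: xs) = (x :: xs).take k.toNat ++ (x :: xs).drop k.toNat :=
        (List.take_append_drop _ _).symm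
      conv_lhs => rw [hsplit]
      rw [PySem.List.enumerate_append, List.map_append]
      by_cases hrest : (x :: xs).drop k.toNat = []
      · -- everything fits in one (last) row
        have hlenK : (x :: xs).length ≤ k.toNat := List.drop_eq_nil_iff.mp hrest
        have htk : (x :: xs).take k.toNat = x :: xs := List.take_of_length_le hlenK
        rw [hrest, htk, pvChunks_nil, pvBcells]
        simp only [PySem.List.enumerate_nil, List.map_nil, List.append_nil, List.isEmpty_nil]
        exact pv_row_last sepL tw k hk (x :: xs) q (by omega)
      · -- a full row followed by more rows
        have hKlt : k.toNat < (x :: xs).length := by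
          by_contra hcon
          exact hrest (List.drop_eq_nil_iff.mpr (by omega))
        have htlen : ((x :: xs).take k.toNat).length = k.toNat := by
          rw [List.length_take]; omega
        have hIE : (pvChunks ((x :: xs).drop k.toNat) (k.toNat - 1)).isEmpty = false := by
          simp [pv_chunks_nil_iff, hrest]
        rw [hIE]
        simp only [List.take_append_drop]
        congr 1
        · exact pv_row_notlast sepL tw k _ hk _ q (by rw [htlen]; omega) (by omega)
        · have hIH := ih ((x :: xs).drop k.toNat)
            (by rw [List.length_drop]; simp only [List.length_cons] at hl ⊢; omega) hrest (q + 1)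
          have hqk : (q : Int) * k + (((x :: xs).take k.toNat).length : Int) = ((q + 1 : Nat) : Int) * k := by
            rw [htlen]; push_cast; have : ((q : Int) + 1) * k = (q : Int) * k + k := by ring
            omega
          have hn2 : (q : Int) * k + ((x :: xs).length : Int) =
              ((q + 1 : Nat) : Int) * k + (((x :: xs).drop k.toNat).length : Int) := by
            rw [List.length_drop]; push_cast
            have : ((q : Int) + 1) * k = (q : Int) * k + k := by ring
            omega
          rw [hqk, hn2]
          exact hIH

lemma pv_bcells_fold (sepL : List Char) (tw k m : Int) :
    ∀ (rows : List (List String)) (j : Int), j + (rows.length : Int) = m →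
      (PySem.List.enumerate rows j).flatMap
        (fun rp => (PySem.List.enumerate rp.2).map (fun cp =>
          if cp.1 = k - 1
          then (if rp.1 = m - 1 ∧ cp.1 = (rp.2.length : Int) - 1 then cp.2.toList
                else cp.2.toList ++ sepL) ++ ['\n']
          else pvLjust (if rp.1 = m - 1 ∧ cp.1 = (rp.2.length : Int) - 1 then cp.2.toList
                else cp.2.toList ++ sepL) tw))
      = pvBcells sepL tw k rows := by
  intro rows
  induction rows with
  | nil => intro j hm; simp [pvBcells, PySem.List.enumerate_nil]
  | cons row rest ih =>
    intro j hm
    rw [PySem.List.enumerate_cons, List.flatMap_cons, pvBcells]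
    simp only [List.length_cons] at hm
    congr 1
    · by_cases hr : rest = []
      · have hj : j = m - 1 := by subst hr; simp at hm; omega
        subst hr
        simp only [List.isEmpty_nil]
        rw [pvRowCells]
        apply List.map_congr_left
        intro cp _
        simp [pvCellB, hj]
      · have hj : ¬ (j = m - 1) := by
          have : 0 < rest.length := List.length_pos_of_ne_nil hr
          omega
        have hIE : rest.isEmpty = false := by simp [hr]
        rw [hIE, pvRowCells]
        apply List.map_congr_left
        intro cp _
        simp [pvCellB, hj]
    · exact ih (j + 1) (by push_cast at hm ⊢; omega)

lemma pv_join_nil_flatten (ps : List (List Char)) : PySem.Chars.join [] ps = ps.flatten := by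
  induction ps with
  | nil => simp [PySem.Chars.join_nil]
  | cons p rest ih =>
    cases rest with
    | nil => simp [PySem.Chars.join, List.intercalate]
    | cons q r => rw [PySem.Chars.join_cons_cons]; simp_all

lemma pv_main (sep : String) (l : List String) (tw k : Int) (hk : 0 < k) (hne : l ≠ [])
    (rows : List (List String))
    (hrows : rows = List.map (fun r => PySem.List.slice l (some r) (some (r + k)))
      (PySem.List.pyRange 0 (l.length : Int) k)) :
    List.flatMap
      (fun p : Int × String =>
        if PySem.Int.mod p.1 k = k - 1 then
          (if p.1 ≠ (l.length : Int) - 1 then p.2.toList ++ sep.toList else p.2.toList) ++ ['\n']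
        else pvLjust (if p.1 ≠ (l.length : Int) - 1 then p.2.toList ++ sep.toList else p.2.toList) tw)
      (PySem.List.enumerate l)
    =
    (List.flatMap
      (fun rp : Int × List String =>
        List.map
          (fun cp : Int × String =>
            if cp.1 = k - 1 then
              (if rp.1 = (rows.length : Int) - 1 ∧ cp.1 = (rp.2.length : Int) - 1 then cp.2.toList
               else cp.2.toList ++ sep.toList) ++ ['\n']
            else pvLjust (if rp.1 = (rows.length : Int) - 1 ∧ cp.1 = (rp.2.length : Int) - 1 then cp.2.toList
               else cp.2.toList ++ sep.toList) tw)
          (PySem.List.enumerate rp.2))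
      (PySem.List.enumerate rows)).flatten := by
  have hre : rows = pvChunks l (k.toNat - 1) :=
    hrows.trans (pv_rows_eq k hk l.length l le_rfl)
  have hc := pv_cells_eq sep.toList tw k hk l.length l le_rfl hne 0
  simp only [Nat.cast_zero, zero_mul, zero_add] at hc
  have hB := pv_bcells_fold sep.toList tw k ((rows.length : Int)) rows 0 (by simp)
  rw [List.flatMap_def,
    show (fun p : Int × String =>
        if PySem.Int.mod p.1 k = k - 1 then
          (if p.1 ≠ (l.length : Int) - 1 then p.2.toList ++ sep.toList else p.2.toList) ++ ['\n']
        else pvLjust (if p.1 ≠ (l.length : Int) - 1 then p.2.toList ++ sep.toList else p.2.toList) tw)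
      = pvCellA sep.toList tw k (l.length : Int) from rfl,
    hc, hB, hre]

theorem columnate_spec_aux (strings : List String) (separator : String) (chars : Int)
    (hpre : Pre_columnate strings separator chars) :
    columnate strings separator chars = columnate_alt strings separator chars := by
  obtain ⟨hne, hpos, hle⟩ := hpre
  match strings with
  | [] => exact absurd rfl hne
  | x :: xs =>
    simp only [List.map_cons, List.foldl_cons] at hpos hle
    have hmax : max (0 : Int) ((x.toList.length : Int)) = (x.toList.length : Int) :=
      max_eq_right (by omega)
    rw [hmax] at hpos hle
    simp only [columnate, columnate_alt, List.map_cons]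
    apply congrArg
    have hkpos : 0 < PySem.Int.floordiv chars
        ((List.map (fun s => (s.toList.length : Int)) xs).foldl max (x.toList.length : Int) +
          (separator.toList.length : Int)) := by
      have h1 := (PySem.Int.le_floordiv_iff_mul_le (a := chars)
        (b := (List.map (fun s => (s.toList.length : Int)) xs).foldl max (x.toList.length : Int) +
          (separator.toList.length : Int)) (q := 1) hpos)
      omega
    simp only [PySem.List.foldl_append_singleton_eq_map, PySem.List.foldl_append_eq_flatMap,
      List.nil_append, pv_join_nil_flatten]
    exact pv_main separator (x :: xs) _ _ hkpos hne _ rfl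

-- ===== VERDICT (by name: the statement is the Claim_ definition above) =====
theorem columnate_spec : Claim_equal_columnate := by
  intro strings separator chars _ hpre
  exact columnate_spec_aux strings separator chars hpre
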